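-- pv_equiv track=rewrite | github.com/AndreaGiumi/Esercizi_Python | lezione_20/code_&_dragons_rpg/missioni_opzionali/esercizio_2.py | chunk_sums
-- ===== SOURCE A (Python) =====
-- def chunk_sums(nums: list[int], size: int) -> list[int]:
--
--     if size < 1:
--         return []
--
--     if not nums:
--         return []
--
--
--     final_lista = []
--
--     new_lista = []
--
--     for num in nums:
--         new_lista.append(num)
--         if len(new_lista) == size:
--             final_lista.append(sum(new_lista))
--             new_lista = []
--     if new_lista:
--         final_lista.append(sum(new_lista))
--     return final_lista
-- ===== SOURCE B (Python) =====
-- def chunk_sums(nums: list[int], size: int) -> list[int]: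
--     if size < 1:
--         return []
--     if not nums:
--         return []
--     return [sum(nums[i:i+size]) for i in range(0, len(nums), size)]
-- ===== Notes on version B (the rewrite author's own statement) =====
-- stated objective: simpler
-- what changed: Replaces the stateful per-element buffer with manual flush by a single slice-based comprehension over chunk start indices range(0, len(nums), size).
import Mathlib
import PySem

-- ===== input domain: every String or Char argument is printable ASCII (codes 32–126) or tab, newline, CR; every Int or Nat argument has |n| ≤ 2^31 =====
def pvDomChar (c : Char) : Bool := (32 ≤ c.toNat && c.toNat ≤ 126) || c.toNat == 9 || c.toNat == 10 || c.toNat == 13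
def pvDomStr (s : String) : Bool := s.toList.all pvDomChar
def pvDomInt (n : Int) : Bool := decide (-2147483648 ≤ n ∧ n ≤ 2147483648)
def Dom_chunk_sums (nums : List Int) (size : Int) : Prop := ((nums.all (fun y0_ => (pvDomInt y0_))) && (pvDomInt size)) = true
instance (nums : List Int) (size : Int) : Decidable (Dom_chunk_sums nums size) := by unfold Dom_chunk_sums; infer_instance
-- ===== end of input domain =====

-- B replaces A's stateful element-buffer with manual flush by a slice-based pass over chunk start indices (range(0, len, size)); objective: simpler.


-- ===== PORT A =====
-- one loop step: append num to the buffer, flush it into the result when it reaches size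
def chunkStep (size : Int) (p : List Int × List Int) (num : Int) : List Int × List Int :=
  let nl := p.2 ++ [num]
  if (nl.length : Int) = size then (p.1 ++ [nl.sum], []) else (p.1, nl)

def chunk_sums (nums : List Int) (size : Int) : List Int :=
  if size < 1 then []
  else if nums = [] then []
  else
    let st := nums.foldl (chunkStep size) ([], [])
    if st.2 ≠ [] then st.1 ++ [st.2.sum] else st.1

-- ===== PORT B =====
def chunk_sums_alt (nums : List Int) (size : Int) : List Int :=
  if size < 1 then []
  else if nums = [] then []
  else (PySem.List.pyRange 0 (nums.length : Int) size).map
         (fun i => (PySem.List.slice nums (some i) (some (i + size))).sum)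

-- ===== PRECONDITION & SPEC =====
def Spec_chunk_sums (nums : List Int) (size : Int) (out : List Int) : Prop := out = chunk_sums_alt nums size
instance (nums : List Int) (size : Int) (out : List Int) : Decidable (Spec_chunk_sums nums size out) := by unfold Spec_chunk_sums; infer_instance

-- ===== CLAIM (what is proved, stated in full; the proofs are below) =====
def Claim_equal_chunk_sums : Prop := ∀ (nums : List Int) (size : Int), Dom_chunk_sums nums size → Spec_chunk_sums nums size (chunk_sums nums size)

-- ===== LEMMAS AND PROOFS =====

-- reference chunking: sum the first k+1 elements, recurse on the rest
def chunkGo (k : Nat) (l : List Int) : List Int :=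
  if l = [] then [] else (l.take (k + 1)).sum :: chunkGo k (l.drop (k + 1))
termination_by l.length
decreasing_by
  cases l with
  | nil => simp_all
  | cons x xs => simp [List.length_drop]

lemma pyRange_nil_of_pos (a b s : Int) (hs : 0 < s) (h : ¬ a < b) :
    PySem.List.pyRange a b s = [] := by
  rw [PySem.List.pyRange_of_pos a b hs]
  simp [h]

lemma pyRange_cons_of_pos (a b s : Int) (hs : 0 < s) (h : a < b) :
    PySem.List.pyRange a b s = a :: PySem.List.pyRange (a + s) b s := by
  rw [PySem.List.pyRange_of_pos a b hs, PySem.List.pyRange_of_pos (a + s) b hs]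
  have key : b - a + s - 1 = (b - a - 1) + 1 * s := by ring
  have h1 : (b - a + s - 1) / s = (b - a - 1) / s + 1 := by
    rw [key, Int.add_mul_ediv_right _ _ (by omega : s ≠ 0)]
  by_cases h2 : a + s < b
  · have hq : 0 ≤ (b - a - 1) / s := Int.ediv_nonneg (by omega) (by omega)
    have hq2 : b - (a + s) + s - 1 = b - a - 1 := by ring
    rw [if_pos h, if_pos h2, hq2, h1, Int.toNat_add hq (by norm_num), Int.toNat_one, List.range_succ_eq_map]
    simp only [List.map_cons, List.map_map]
    congr 1
    · simp
    · apply List.map_congr_left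
      intro k _
      simp only [Function.comp_apply]
      push_cast
      ring
  · -- one last chunk: the remaining count is 1
    have hz : (b - a - 1) / s = 0 := by
      apply Int.ediv_eq_zero_of_lt (by omega) (by omega)
    rw [if_pos h, if_neg h2, h1, hz]
    simp

lemma B_go (nums : List Int) (k : Nat) (i : Int) (hi : 0 ≤ i) :
    (PySem.List.pyRange i (nums.length : Int) ((k : Int) + 1)).map
      (fun j => (PySem.List.slice nums (some j) (some (j + ((k : Int) + 1)))).sum)
    = chunkGo k (nums.drop i.toNat) := by
  by_cases h : i < (nums.length : Int)
  · rw [pyRange_cons_of_pos _ _ _ (by omega) h, List.map_cons]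
    have hne : nums.drop i.toNat ≠ [] := by
      have : i.toNat < nums.length := by omega
      simp [List.drop_eq_nil_iff]
      omega
    rw [chunkGo, if_neg hne]
    have hslice : PySem.List.slice nums (some i) (some (i + ((k : Int) + 1)))
        = (nums.drop i.toNat).take (k + 1) := by
      rw [PySem.List.slice_toNat nums hi (by omega)]
      congr 1
      omega
    have hrec := B_go nums k (i + ((k : Int) + 1)) (by omega)
    rw [hslice, hrec]
    have hdrop : nums.drop (i + ((k : Int) + 1)).toNat = (nums.drop i.toNat).drop (k + 1) := by
      rw [List.drop_drop]
      congr 1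
      omega
    rw [hdrop]
  · rw [pyRange_nil_of_pos _ _ _ (by omega) h]
    have : nums.drop i.toNat = [] := by
      rw [List.drop_eq_nil_iff]
      omega
    rw [this, chunkGo]
    simp
termination_by (nums.length - i.toNat)
decreasing_by omega

lemma A_inv (k : Nat) (hk : 0 < k) (l : List Int) :
    ∀ acc buf : List Int, buf.length < k →
    (let st := l.foldl (chunkStep (k : Int)) (acc, buf)
     if st.2 ≠ [] then st.1 ++ [st.2.sum] else st.1)
    = acc ++ chunkGo (k - 1) (buf ++ l) := by
  induction l with
  | nil =>
    intro acc buf hb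
    simp only [List.foldl_nil, List.append_nil]
    rw [chunkGo]
    by_cases hbuf : buf = []
    · simp [hbuf]
    · rw [if_neg hbuf]
      have htake : buf.take (k - 1 + 1) = buf := List.take_of_length_le (by omega)
      have hdrop : buf.drop (k - 1 + 1) = [] := by rw [List.drop_eq_nil_iff]; omega
      rw [htake, hdrop, chunkGo]
      simp [hbuf]
  | cons x l' ih =>
    intro acc buf hb
    simp only [List.foldl_cons]
    by_cases hfull : ((buf ++ [x]).length : Int) = (k : Int)
    · have hfull' : buf.length + 1 = k := by simp at hfull; omega
      rw [show (chunkStep (k:Int) (acc, buf) x) = (acc ++ [(buf ++ [x]).sum], []) by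
            simp only [chunkStep]; rw [if_pos hfull]]
      rw [ih (acc ++ [(buf ++ [x]).sum]) [] (by simpa using hk)]
      simp only [List.nil_append]
      have hsplit : buf ++ x :: l' = (buf ++ [x]) ++ l' := by simp
      rw [hsplit]
      have hne : (buf ++ [x]) ++ l' ≠ [] := by simp
      have hlen : (buf ++ [x]).length = k - 1 + 1 := by simp; omega
      have htake : ((buf ++ [x]) ++ l').take (k - 1 + 1) = buf ++ [x] := by
        rw [← hlen, List.take_left]
      have hdrop : ((buf ++ [x]) ++ l').drop (k - 1 + 1) = l' := by
        rw [← hlen, List.drop_left]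
      conv_rhs => rw [chunkGo, if_neg hne, htake, hdrop]
      simp
    · have hlt : (buf ++ [x]).length < k := by
        simp at hfull ⊢
        omega
      rw [show (chunkStep (k:Int) (acc, buf) x) = (acc, buf ++ [x]) by
            simp only [chunkStep]; rw [if_neg hfull]]
      rw [ih acc (buf ++ [x]) hlt]
      congr 1
      simp

-- ===== VERDICT (by name: the statement is the Claim_ definition above) =====
theorem chunk_sums_spec : Claim_equal_chunk_sums := by
  intro nums size _
  unfold Spec_chunk_sums chunk_sums chunk_sums_alt
  by_cases hs : size < 1
  · simp [hs]
  · rw [if_neg hs, if_neg hs]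
    by_cases hn : nums = []
    · simp [hn]
    · rw [if_neg hn, if_neg hn]
      have hk : 0 < size.toNat := by omega
      have hcast : ((size.toNat : Int)) = size := by omega
      have hA := A_inv size.toNat hk nums [] [] (by simpa using hk)
      rw [hcast] at hA
      simp only [List.nil_append] at hA
      rw [hA]
      have hB := B_go nums (size.toNat - 1) 0 le_rfl
      have hc2 : ((size.toNat - 1 : Nat) : Int) + 1 = size := by omega
      rw [hc2] at hB
      simp only [Int.toNat_zero, List.drop_zero] at hB
      rw [hB]
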